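-- pv_equiv track=rewrite | github.com/pchen12567/team_vec2world | project_01/model/try_pyltp.py | get_names_with_position
-- ===== SOURCE A (Python) =====
-- def get_names_with_position(sentence, words, total_names):
--     # 初始化返回列表
--     names_with_position = []
--
--     # 遍历全文的人名
--     for name, name_seg in total_names.items():
--         # 当前句包含人名
--         if name in sentence:
--             # 单个词构成的人名
--             if len(name_seg) == 1:
--                 # 遍历当前句
--                 for index, w in enumerate(words):
--                     # 提取所有单词构成的人名及其位置
--                     if w == name:
--                         position = (index, index)
--                         names_with_position.append((name, position))
--
--             # 多个词构成的人名
--             if len(name_seg) > 1: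
--                 # 遍历当前句
--                 for start_index, w in enumerate(words):
--                     # 提取所有多词构成的人名及其位置
--                     if w == name_seg[0]:
--                         end_index = start_index + len(name_seg) - 1
--                         position = (start_index, end_index)
--                         names_with_position.append((name, position))
--
--     # 返回人名和位置结果列表，元素为元组(name, (start_index, end_index))
--     return names_with_position
-- ===== SOURCE B (Python) =====
-- def get_names_with_position(sentence, words, total_names):
--     # One pass over the sentence words: word -> list of its positions.
--     index = {}
--     for i, w in enumerate(words):
--         index.setdefault(w, []).append(i)
--
--     names_with_position = []
--     for name, name_seg in total_names.items():
--         if name not in sentence: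
--             continue
--         n = len(name_seg)
--         if n == 1:
--             names_with_position.extend(
--                 (name, (i, i)) for i in index.get(name, []))
--         elif n > 1:
--             names_with_position.extend(
--                 (name, (i, i + n - 1)) for i in index.get(name_seg[0], []))
--     return names_with_position
-- ===== Notes on version B (the rewrite author's own statement) =====
-- stated objective: alternative
-- what changed: B builds a word->positions dictionary in one pass over the sentence words and replaces A's per-name scan of the whole word list by a single dictionary lookup per name (O(M+N+output) vs O(N*M); not measured faster on the generated inputs).
import Mathlib
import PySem

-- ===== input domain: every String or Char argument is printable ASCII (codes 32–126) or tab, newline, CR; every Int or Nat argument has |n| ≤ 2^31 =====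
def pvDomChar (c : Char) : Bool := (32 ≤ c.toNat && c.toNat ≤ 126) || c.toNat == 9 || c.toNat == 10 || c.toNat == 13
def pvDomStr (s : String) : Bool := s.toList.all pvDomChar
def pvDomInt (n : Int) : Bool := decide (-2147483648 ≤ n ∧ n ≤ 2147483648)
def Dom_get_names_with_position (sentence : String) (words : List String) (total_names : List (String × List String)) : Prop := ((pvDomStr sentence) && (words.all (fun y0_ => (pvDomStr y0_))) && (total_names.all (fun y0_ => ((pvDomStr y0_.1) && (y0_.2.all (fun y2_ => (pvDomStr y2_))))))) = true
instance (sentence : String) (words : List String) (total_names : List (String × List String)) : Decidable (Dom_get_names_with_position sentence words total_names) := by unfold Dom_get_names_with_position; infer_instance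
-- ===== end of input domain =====

-- ===== PORT A =====
-- B replaces A's per-name scan of all words per name by one word->positions index built in a single pass, then one lookup per name (alternative algorithm; speed not measured).
def get_names_with_position (sentence : String) (words : List String) (total_names : List (String × List String)) : List (String × (Int × Int)) :=
  total_names.foldl (fun names_with_position nt =>
    if PySem.Str.isIn nt.1 sentence then
      let acc1 :=
        if nt.2.length == 1 then
          (PySem.List.enumerate words).foldl
            (fun acc p => if p.2 == nt.1 then acc ++ [(nt.1, (p.1, p.1))] else acc)
            names_with_position
        else names_with_position
      if nt.2.length > 1 then
        (PySem.List.enumerate words).foldl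
          (fun acc p => if p.2 == PySem.List.pyGetD nt.2 0 "" then acc ++ [(nt.1, (p.1, p.1 + (nt.2.length : Int) - 1))] else acc)
          acc1
      else acc1
    else names_with_position) []

-- ===== PORT B =====
-- one pass over the words: word -> list of its positions (index.setdefault(w, []).append(i))
def pvWordIndex (words : List String) : PySem.Dict String (List Int) :=
  (PySem.List.enumerate words).foldl (fun d p => d.modify p.2 [] (· ++ [p.1])) PySem.Dict.empty

def get_names_with_position_alt (sentence : String) (words : List String) (total_names : List (String × List String)) : List (String × (Int × Int)) :=
  let index := pvWordIndex words
  total_names.foldl (fun res nt =>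
    if PySem.Str.isIn nt.1 sentence then
      if nt.2.length == 1 then
        res ++ (index.getD nt.1 []).map (fun i => (nt.1, (i, i)))
      else if nt.2.length > 1 then
        res ++ (index.getD (PySem.List.pyGetD nt.2 0 "") []).map
          (fun i => (nt.1, (i, i + (nt.2.length : Int) - 1)))
      else res
    else res) []

-- ===== PRECONDITION & SPEC =====
def Spec_get_names_with_position (sentence : String) (words : List String) (total_names : List (String × List String)) (out : List (String × (Int × Int))) : Prop := out = get_names_with_position_alt sentence words total_names
instance (sentence : String) (words : List String) (total_names : List (String × List String)) (out : List (String × (Int × Int))) : Decidable (Spec_get_names_with_position sentence words total_names out) := by unfold Spec_get_names_with_position; infer_instance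

-- ===== CLAIM (what is proved, stated in full; the proofs are below) =====
def Claim_equal_get_names_with_position : Prop := ∀ (sentence : String) (words : List String) (total_names : List (String × List String)), Dom_get_names_with_position sentence words total_names → Spec_get_names_with_position sentence words total_names (get_names_with_position sentence words total_names)

-- ===== LEMMAS AND PROOFS =====

-- the index built by B looks up exactly the positions A's inner scan collects
theorem pvWordIndex_getD (words : List String) (key : String) :
    (pvWordIndex words).getD key []
      = ((PySem.List.enumerate words).filter (fun p => p.2 == key)).map (·.1) := by
  have h : pvWordIndex words
      = ((PySem.List.enumerate words).map (fun p => (p.2, p.1))).foldl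
          (fun d p => d.modify p.1 [] (· ++ [p.2])) PySem.Dict.empty := by
    rw [List.foldl_map]; rfl
  rw [h, PySem.Dict.getD_foldl_modify_append]
  simp [List.filter_map, Function.comp_def]

-- the two per-name step functions agree
theorem pv_step_eq (sentence : String) (words : List String)
    (acc : List (String × (Int × Int))) (nt : String × List String) :
    (if PySem.Str.isIn nt.1 sentence then
      let acc1 :=
        if nt.2.length == 1 then
          (PySem.List.enumerate words).foldl
            (fun acc p => if p.2 == nt.1 then acc ++ [(nt.1, (p.1, p.1))] else acc) acc
        else acc
      if nt.2.length > 1 then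
        (PySem.List.enumerate words).foldl
          (fun acc p => if p.2 == PySem.List.pyGetD nt.2 0 "" then acc ++ [(nt.1, (p.1, p.1 + (nt.2.length : Int) - 1))] else acc)
          acc1
      else acc1
    else acc)
    = (if PySem.Str.isIn nt.1 sentence then
        if nt.2.length == 1 then
          acc ++ ((pvWordIndex words).getD nt.1 []).map (fun i => (nt.1, (i, i)))
        else if nt.2.length > 1 then
          acc ++ ((pvWordIndex words).getD (PySem.List.pyGetD nt.2 0 "") []).map
            (fun i => (nt.1, (i, i + (nt.2.length : Int) - 1)))
        else acc
      else acc) := by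
  by_cases hin : PySem.Str.isIn nt.1 sentence = true
  · simp only [hin, if_true]
    simp only [PySem.List.foldl_append_if, pvWordIndex_getD, List.map_map]
    by_cases h1 : nt.2.length = 1
    · simp only [h1, beq_self_eq_true, if_true]
      simp [Function.comp_def]
    · have hb : (nt.2.length == 1) = false := by simp [h1]
      by_cases h2 : 1 < nt.2.length
      · simp only [hb, Bool.false_eq_true, if_false, if_pos h2]
        simp [Function.comp_def]
      · simp only [hb, Bool.false_eq_true, if_false, if_neg h2]
  · simp only [Bool.not_eq_true] at hin
    simp only [hin, Bool.false_eq_true, if_false]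

-- ===== VERDICT (by name: the statement is the Claim_ definition above) =====
theorem get_names_with_position_spec : Claim_equal_get_names_with_position := by
  intro sentence words total_names _
  unfold Spec_get_names_with_position get_names_with_position get_names_with_position_alt
  exact List.foldl_ext _ _ [] (fun acc nt _ => pv_step_eq sentence words acc nt)
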